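-- pv_equiv track=rewrite | github.com/gaoc33721-ai/video-script-creator | app.py | _extract_first_md_table
-- ===== SOURCE A (Python) =====
-- def _extract_first_md_table(text):
--     if not text:
--         return [], ""
--     lines = text.splitlines()
--     table = []
--     started = False
--     end_idx = None
--     for idx, line in enumerate(lines):
--         s = line.strip()
--         if not started:
--             if s.startswith("|") and s.count("|") >= 2:
--                 started = True
--                 table.append(line)
--             continue
--         if started:
--             if s.startswith("|") and s.count("|") >= 2:
--                 table.append(line)
--             else:
--                 end_idx = idx
--                 break
--     remainder = "\n".join(lines[end_idx:]).strip() if end_idx is not None else ""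
--     return table, remainder
-- ===== SOURCE B (Python) =====
-- def _extract_first_md_table(text):
--     def is_table_line(line):
--         s = line.strip()
--         return s.startswith("|") and s.count("|") >= 2
--
--     lines = text.splitlines()
--     flags = [is_table_line(l) for l in lines]
--     if True not in flags:
--         return [], ""
--     start = flags.index(True)
--     if False not in flags[start:]:
--         return lines[start:], ""
--     end = flags.index(False, start)
--     return lines[start:end], "\n".join(lines[end:]).strip()
-- ===== Notes on version B (the rewrite author's own statement) =====
-- stated objective: alternative
-- what changed: Replaces A's single stateful scan (started flag, break, end index) with a declarative pipeline: compute a boolean flag per line once, locate the table run with list.index, and return slices of the original lines.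
import Mathlib
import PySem

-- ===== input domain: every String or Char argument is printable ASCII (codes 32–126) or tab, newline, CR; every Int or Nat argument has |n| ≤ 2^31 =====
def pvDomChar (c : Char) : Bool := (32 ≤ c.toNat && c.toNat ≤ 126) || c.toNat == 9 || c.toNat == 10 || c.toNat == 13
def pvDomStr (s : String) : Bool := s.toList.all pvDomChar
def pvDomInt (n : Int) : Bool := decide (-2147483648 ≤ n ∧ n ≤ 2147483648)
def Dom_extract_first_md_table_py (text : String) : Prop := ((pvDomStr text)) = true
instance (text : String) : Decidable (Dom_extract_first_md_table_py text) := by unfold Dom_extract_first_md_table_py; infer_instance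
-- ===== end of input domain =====

-- B restructures A's stateful scan into a flags-then-index pipeline; same return value everywhere.

-- shared helper: the table-line predicate both Pythons compute (A inline, B as a nested def)
def pvIsTable (line : String) : Bool :=
  let s := PySem.Str.strip line
  PySem.Str.startswith s "|" && decide (2 ≤ PySem.Str.count s "|")

-- ===== PORT A =====
-- A's for-loop with `started`/`end_idx` state and `break`, as structural recursion
def pvGoA : List String → Nat → List String → Bool → List String × Option Nat
  | [], _, table, _ => (table, none)
  | line :: rest, idx, table, started =>
    if started = false then
      if pvIsTable line then pvGoA rest (idx + 1) (table ++ [line]) true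
      else pvGoA rest (idx + 1) table started
    else
      if pvIsTable line then pvGoA rest (idx + 1) (table ++ [line]) started
      else (table, some idx)

def extract_first_md_table_py (text : String) : List String × String :=
  if text = "" then ([], "")
  else
    let lines := PySem.Str.splitlines text
    let r := pvGoA lines 0 [] false
    let remainder :=
      match r.2 with
      | some e => PySem.Str.strip (PySem.Str.join "\n" (PySem.List.slice lines (some (e : Int)) none))
      | none => ""
    (r.1, remainder)

-- ===== PORT B =====
-- flags.index(False, start) is ported as start + index of False in flags[start:]
def extract_first_md_table_py_alt (text : String) : List String × String :=
  let lines := PySem.Str.splitlines text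
  let flags := lines.map pvIsTable
  if flags.contains true = false then ([], "")
  else
    let start := (PySem.List.index? flags true).getD 0
    if (PySem.List.slice flags (some (start : Int)) none).contains false = false then
      (PySem.List.slice lines (some (start : Int)) none, "")
    else
      let endi := start + (PySem.List.index? (flags.drop start) false).getD 0
      (PySem.List.slice lines (some (start : Int)) (some (endi : Int)),
       PySem.Str.strip (PySem.Str.join "\n" (PySem.List.slice lines (some (endi : Int)) none)))

-- ===== PRECONDITION & SPEC =====
def Spec_extract_first_md_table_py (text : String) (out : List String × String) : Prop := out = extract_first_md_table_py_alt text
instance (text : String) (out : List String × String) : Decidable (Spec_extract_first_md_table_py text out) := by unfold Spec_extract_first_md_table_py; infer_instance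

-- ===== CLAIM (what is proved, stated in full; the proofs are below) =====
def Claim_equal_extract_first_md_table_py : Prop := ∀ (text : String), Dom_extract_first_md_table_py text → Spec_extract_first_md_table_py text (extract_first_md_table_py text)

-- ===== LEMMAS AND PROOFS =====

-- A's core and B's core as functions of the split lines
def pvA (lines : List String) : List String × String :=
  let r := pvGoA lines 0 [] false
  (r.1,
   match r.2 with
   | some e => PySem.Str.strip (PySem.Str.join "\n" (PySem.List.slice lines (some (e : Int)) none))
   | none => "")

def pvB (lines : List String) : List String × String :=
  let flags := lines.map pvIsTable
  if flags.contains true = false then ([], "")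
  else
    let start := (PySem.List.index? flags true).getD 0
    if (PySem.List.slice flags (some (start : Int)) none).contains false = false then
      (PySem.List.slice lines (some (start : Int)) none, "")
    else
      let endi := start + (PySem.List.index? (flags.drop start) false).getD 0
      (PySem.List.slice lines (some (start : Int)) (some (endi : Int)),
       PySem.Str.strip (PySem.Str.join "\n" (PySem.List.slice lines (some (endi : Int)) none)))

theorem A_eq_pvA (text : String) (h : text ≠ "") :
    extract_first_md_table_py text = pvA (PySem.Str.splitlines text) := by
  simp [extract_first_md_table_py, pvA, h]

theorem B_eq_pvB (text : String) :
    extract_first_md_table_py_alt text = pvB (PySem.Str.splitlines text) := rfl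

theorem goA_shift (ls : List String) : ∀ (idx : Nat) (t : List String) (s : Bool),
    pvGoA ls idx t s = ((pvGoA ls 0 t s).1, (pvGoA ls 0 t s).2.map (· + idx)) := by
  induction ls with
  | nil => intro idx t s; simp [pvGoA]
  | cons l rest ih =>
    intro idx t s
    by_cases hs : s = false <;> by_cases hp : pvIsTable l <;>
      simp only [pvGoA, hs, hp, if_true, if_false, ite_true, ite_false,
        Bool.true_eq_false, Bool.false_eq_true] <;>
      [skip; skip; skip; simp] <;>
      (first
        | (rw [ih (idx + 1) (t ++ [l]) true, ih 1 (t ++ [l]) true]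
           cases (pvGoA rest 0 (t ++ [l]) true).2 <;> simp <;> omega)
        | (rw [ih (idx + 1) t false, ih 1 t false]
           cases (pvGoA rest 0 t false).2 <;> simp <;> omega))

theorem goA_true (ls : List String) : ∀ (idx : Nat) (t : List String),
    pvGoA ls idx t true =
      (t ++ ls.takeWhile pvIsTable,
       if ls.dropWhile pvIsTable = [] then none
       else some (idx + (ls.takeWhile pvIsTable).length)) := by
  induction ls with
  | nil => intro idx t; simp [pvGoA]
  | cons l rest ih =>
    intro idx t
    simp only [pvGoA]
    by_cases hp : pvIsTable l <;> simp only [hp, ite_true, ite_false, if_true, if_false]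
    · rw [ih]
      simp [List.takeWhile_cons, List.dropWhile_cons, hp]
      split <;> simp <;> omega
    · simp [List.takeWhile_cons, List.dropWhile_cons, hp]

theorem idx_false (bs : List Bool) (h : false ∈ bs) :
    PySem.List.index? bs false = some ((bs.takeWhile (· == true)).length) := by
  induction bs with
  | nil => simp at h
  | cons b rest ih =>
    cases b with
    | false => rw [PySem.List.index?_cons_self]; simp
    | true =>
      have hm : false ∈ rest := by simpa using h
      rw [PySem.List.index?_cons_of_ne rest (show (true : Bool) ≠ false by simp), ih hm]
      simp

theorem takeWhile_map_flags (xs : List String) :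
    ((xs.map pvIsTable).takeWhile (· == true)).length = (xs.takeWhile pvIsTable).length := by
  rw [List.takeWhile_map]
  simp [Function.comp_def]

theorem pvA_eq_pvB : ∀ (lines : List String), pvA lines = pvB lines := by
  intro lines
  induction lines with
  | nil => simp [pvA, pvB, pvGoA]
  | cons l rest ih =>
    by_cases hp : pvIsTable l
    · -- the table starts at line 0
      clear ih
      have h0 : PySem.List.index? ((l :: rest).map pvIsTable) true = some 0 := by
        rw [List.map_cons, hp]; exact PySem.List.index?_cons_self _ _
      have hct : ((l :: rest).map pvIsTable).contains true = true := by
        rw [List.map_cons, hp]; simp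
      by_cases hall : ∀ m ∈ rest, pvIsTable m = true
      · have hdw : rest.dropWhile pvIsTable = [] := List.dropWhile_eq_nil_iff.mpr hall
        have htw : rest.takeWhile pvIsTable = rest := by
          have h1 := List.takeWhile_append_dropWhile (p := pvIsTable) (l := rest)
          rw [hdw, List.append_nil] at h1; exact h1
        have hup : ∀ x ∈ l :: rest, pvIsTable x = true := by
          intro x hx
          rcases List.mem_cons.mp hx with rfl | hx'
          · exact hp
          · exact hall x hx'
        have hcf : ((l :: rest).map pvIsTable).contains false = false := by
          simp only [List.contains_eq_mem, List.mem_map, decide_eq_false_iff_not]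
          rintro ⟨x, hx, hfx⟩
          rw [hup x hx] at hfx; cases hfx
        have hA : pvA (l :: rest) = (l :: rest, "") := by
          simp only [pvA, pvGoA, hp, ite_true, Bool.false_eq_true, ite_false]
          rw [goA_true]
          simp [htw, hdw]
        have hB : pvB (l :: rest) = (l :: rest, "") := by
          simp only [pvB, h0, Option.getD_some, Nat.cast_zero, PySem.List.slice_zero_start,
            PySem.List.slice_none_none]
          rw [if_neg (by rw [hct]; simp), if_pos hcf]
        rw [hA, hB]
      · push_neg at hall
        obtain ⟨m, hm, hfm'⟩ := hall
        have hfm : pvIsTable m = false := by simpa using hfm'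
        have hdw : rest.dropWhile pvIsTable ≠ [] := by
          intro hc
          have := List.dropWhile_eq_nil_iff.mp hc m hm
          rw [hfm] at this; cases this
        have hmemf : false ∈ (l :: rest).map pvIsTable :=
          List.mem_map.mpr ⟨m, List.mem_cons_of_mem _ hm, hfm⟩
        have hcf : ((l :: rest).map pvIsTable).contains false = true := by
          simpa [List.contains_eq_mem] using hmemf
        have hidx := idx_false _ hmemf
        have hk : (((l :: rest).map pvIsTable).takeWhile (· == true)).length
            = (rest.takeWhile pvIsTable).length + 1 := by
          rw [takeWhile_map_flags, List.takeWhile_cons, hp]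
          simp
        have hgen : ∀ (tw dw : List String), rest = tw ++ dw → rest.drop tw.length = dw := by
          rintro tw dw h; rw [h, List.drop_left]
        have htake : (l :: rest).take ((rest.takeWhile pvIsTable).length + 1)
            = l :: rest.takeWhile pvIsTable := by
          simp only [List.take_succ_cons, List.cons.injEq, true_and]
          exact (List.prefix_iff_eq_take.mp (List.takeWhile_prefix _)).symm
        have hdrop : (l :: rest).drop ((rest.takeWhile pvIsTable).length + 1)
            = rest.dropWhile pvIsTable := by
          simp only [List.drop_succ_cons]
          exact hgen _ _ (List.takeWhile_append_dropWhile (p := pvIsTable) (l := rest)).symm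
        have hA : pvA (l :: rest)
            = (l :: rest.takeWhile pvIsTable,
               PySem.Str.strip (PySem.Str.join "\n"
                 ((l :: rest).drop ((rest.takeWhile pvIsTable).length + 1)))) := by
          simp only [pvA, pvGoA, hp, ite_true, Bool.false_eq_true, ite_false]
          rw [goA_true]
          simp only [hdw, ite_false, if_false, List.nil_append]
          rw [PySem.List.slice_from_natCast]
          simp [Nat.add_comm]
        have hB : pvB (l :: rest)
            = (l :: rest.takeWhile pvIsTable,
               PySem.Str.strip (PySem.Str.join "\n"
                 ((l :: rest).drop ((rest.takeWhile pvIsTable).length + 1)))) := by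
          simp only [pvB, h0, Option.getD_some, Nat.cast_zero, PySem.List.slice_zero_start,
            PySem.List.slice_none_none, List.drop_zero]
          rw [if_neg (by rw [hct]; simp), if_neg (by rw [hcf]; simp), hidx]
          simp only [Option.getD_some, hk, Nat.zero_add]
          rw [PySem.List.slice_to_natCast, PySem.List.slice_from_natCast, htake]
        rw [hA, hB]
    · -- first line is not a table line: both sides reduce to the tail
      have hAstep : pvA (l :: rest) = pvA rest := by
        simp only [pvA, pvGoA, hp, if_true, ite_true, Bool.false_eq_true, if_false, ite_false]
        rw [goA_shift rest 1]
        cases he : (pvGoA rest 0 [] false).2 with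
        | none => simp [he]
        | some e =>
          simp only [he, Option.map_some]
          rw [PySem.List.slice_from_natCast, PySem.List.slice_from_natCast]
          norm_num [List.drop_succ_cons]
      have hpf : pvIsTable l = false := by simpa using hp
      have hBstep : pvB (l :: rest) = pvB rest := by
        cases hct : (rest.map pvIsTable).contains true with
        | false =>
          have h1 : ((false : Bool) :: rest.map pvIsTable).contains true = false := by
            rw [List.contains_cons, hct]; rfl
          simp only [pvB, List.map_cons, hpf]
          rw [if_pos h1, if_pos hct]
        | true =>
          have hex : ∃ a ∈ rest, pvIsTable a = true := by simpa using hct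
          obtain ⟨a, ha, hpa⟩ := hex
          have hmem : true ∈ rest.map pvIsTable := List.mem_map.mpr ⟨a, ha, hpa⟩
          obtain ⟨s', hs'⟩ := Option.isSome_iff_exists.mp ((PySem.List.index?_isSome_iff _ _).mpr hmem)
          have h1 : ((false : Bool) :: rest.map pvIsTable).contains true = true := by
            rw [List.contains_cons, hct]; rfl
          have hidx1 : PySem.List.index? ((false : Bool) :: rest.map pvIsTable) true
              = some (s' + 1) := by
            rw [PySem.List.index?_cons_of_ne (rest.map pvIsTable)
              (show (false : Bool) ≠ true by simp), hs']
            rfl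
          simp only [pvB, List.map_cons, hpf, hidx1, hs', Option.getD_some, h1, hct]
          rw [if_neg (show ¬ (true = false) by simp), if_neg (show ¬ (true = false) by simp)]
          simp only [PySem.List.slice_natCast, PySem.List.slice_from_natCast,
            Nat.add_right_comm s' 1, List.drop_succ_cons]
          cases hcf : ((rest.map pvIsTable).drop s').contains false with
          | false => rw [if_pos rfl, if_pos rfl]
          | true =>
            rw [if_neg (show ¬ (true = false) by simp), if_neg (show ¬ (true = false) by simp)]
            have harith : ∀ k : ℕ, s' + k + 1 - (s' + 1) = s' + k - s' := by omega
            rw [harith]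
      rw [hAstep, hBstep, ih]

-- ===== VERDICT (by name: the statement is the Claim_ definition above) =====
theorem extract_first_md_table_py_spec : Claim_equal_extract_first_md_table_py := by
  intro text _
  show extract_first_md_table_py text = extract_first_md_table_py_alt text
  by_cases h : text = ""
  · subst h; decide
  · rw [A_eq_pvA text h, B_eq_pvB, pvA_eq_pvB]
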